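-- pv_equiv track=rewrite | github.com/CrazySherman/PromptTuner | arithmetics_task.py | generate_addition
-- ===== SOURCE A (Python) =====
-- def generate_addition(a, b):
--     """The question is how to ensure the expressions (prompt) have no ambiguity, ambiguities like:
--
--     case 1: aaaab
--     case 2: aaaaa
--     for auto-regressive decoder, up to the 4th token the model sees exactly same thing, but end token is different.
--
--     Clearly, this form of addition problem has no ambiguity. But what about other problems?
--     """
--     # text = "%d+%d;" % (a, b) # symbolic form
--     text = "%d + %d : " % (a,b) # non symbolic form
--     carry = 0
--     s = a + b
--     while True:
--         # text += "%d%d%d" % (a % 10, b % 10, carry)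
--         text += "%d %d %d" % (a % 10, b % 10, carry) # alignment mode only
--         # if a == 0 and b == 0 and carry == 0:
--         #     break
--
--         # aignment mode only
--         if a == 0 and b == 0:
--             break
--         text += " %d ; " % ((a + b + carry) % 10)
--         carry = (a % 10 + b % 10 + carry) // 10
--         a = a // 10
--         b = b // 10
--     text += " = %d $" % s
--     return text
-- ===== SOURCE B (Python) =====
-- def generate_addition(a, b):
--     # Positional recursion: at power p, the digits of a and b and the carry into
--     # that position are computed directly from remainders ((a%p + b%p) // p),
--     # so no carry state is propagated; recursion stops when both numbers fit below p.
--     s = a + b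
--     def rows(p):
--         row = "%d %d %d" % (a // p % 10, b // p % 10, (a % p + b % p) // p)
--         if a < p and b < p:
--             return row
--         return row + " %d ; " % (s // p % 10) + rows(10 * p)
--     return "%d + %d : " % (a, b) + rows(1) + " = %d $" % s
-- ===== Notes on version B (the rewrite author's own statement) =====
-- stated objective: alternative
-- what changed: A propagates a mutable carry through one sequential while loop that also builds the string; B recurses over powers of ten and computes each row's digits and carry-in positionally in closed form from remainders ((a%p + b%p)//p), carrying no state between positions.
import Mathlib
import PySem

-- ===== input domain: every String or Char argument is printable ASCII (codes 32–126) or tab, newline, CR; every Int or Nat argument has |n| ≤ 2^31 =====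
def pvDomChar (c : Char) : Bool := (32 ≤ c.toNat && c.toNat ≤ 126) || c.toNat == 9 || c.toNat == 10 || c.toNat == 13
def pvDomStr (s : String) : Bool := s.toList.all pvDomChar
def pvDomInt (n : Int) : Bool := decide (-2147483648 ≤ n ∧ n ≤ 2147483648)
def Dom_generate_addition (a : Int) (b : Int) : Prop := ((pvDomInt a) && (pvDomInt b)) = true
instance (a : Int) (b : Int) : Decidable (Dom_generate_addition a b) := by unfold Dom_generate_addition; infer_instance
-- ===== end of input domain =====

-- B replaces A's sequential carry-propagating string loop by a positional recursion over powers of ten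
-- that computes each row's digits and carry-in in closed form from remainders; same output.
-- Pre_ restricts to 0 ≤ a ∧ 0 ≤ b: for a negative argument Python's floor division never reaches 0, so A's loop diverges.


-- ===== PORT A =====
-- A's while-True loop; fuel only makes it total (40 ≫ the ≤ 11 iterations any input in Dom ∩ Pre_ needs)
def genAddLoop (fuel : Nat) (a b carry : Int) (text : String) : String :=
  match fuel with
  | 0 => text
  | fuel + 1 =>
    let text := text ++ PySem.Int.toStr (PySem.Int.mod a 10) ++ " " ++
                PySem.Int.toStr (PySem.Int.mod b 10) ++ " " ++ PySem.Int.toStr carry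
    if a == 0 && b == 0 then text
    else
      let text := text ++ " " ++ PySem.Int.toStr (PySem.Int.mod (a + b + carry) 10) ++ " ; "
      genAddLoop fuel (PySem.Int.floordiv a 10) (PySem.Int.floordiv b 10)
        (PySem.Int.floordiv (PySem.Int.mod a 10 + PySem.Int.mod b 10 + carry) 10) text

def generate_addition (a : Int) (b : Int) : String :=
  let text := PySem.Int.toStr a ++ " + " ++ PySem.Int.toStr b ++ " : "
  let s := a + b
  genAddLoop 40 a b 0 text ++ " = " ++ PySem.Int.toStr s ++ " $"

-- ===== PORT B =====
-- Source B's inner recursion rows(p): at power p the digits and the carry into that position are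
-- computed positionally from remainders; no carry state is threaded. Same fuel-totalisation guard.
def genAddRows (fuel : Nat) (a b s p : Int) : String :=
  match fuel with
  | 0 => ""
  | fuel + 1 =>
    let row := PySem.Int.toStr (PySem.Int.mod (PySem.Int.floordiv a p) 10) ++ " " ++
               PySem.Int.toStr (PySem.Int.mod (PySem.Int.floordiv b p) 10) ++ " " ++
               PySem.Int.toStr (PySem.Int.floordiv (PySem.Int.mod a p + PySem.Int.mod b p) p)
    if a < p && b < p then row
    else row ++ " " ++ PySem.Int.toStr (PySem.Int.mod (PySem.Int.floordiv s p) 10) ++ " ; " ++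
         genAddRows fuel a b s (10 * p)

def generate_addition_alt (a : Int) (b : Int) : String :=
  PySem.Int.toStr a ++ " + " ++ PySem.Int.toStr b ++ " : " ++
  genAddRows 40 a b (a + b) 1 ++ " = " ++ PySem.Int.toStr (a + b) ++ " $"

-- ===== PRECONDITION & SPEC =====
-- Pre_ excludes negative arguments: there Python's a//10 never reaches 0 and A's while loop diverges.
def Pre_generate_addition (a : Int) (b : Int) : Prop := 0 ≤ a ∧ 0 ≤ b
instance (a : Int) (b : Int) : Decidable (Pre_generate_addition a b) := by
  unfold Pre_generate_addition; infer_instance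
def pvWitness_generate_addition : Int × Int := (57, 8)

def Spec_generate_addition (a : Int) (b : Int) (out : String) : Prop := out = generate_addition_alt a b
instance (a : Int) (b : Int) (out : String) : Decidable (Spec_generate_addition a b out) := by
  unfold Spec_generate_addition; infer_instance

-- ===== CLAIM =====
def Claim_equal_generate_addition : Prop := ∀ (a : Int) (b : Int), Dom_generate_addition a b → Pre_generate_addition a b → Spec_generate_addition a b (generate_addition a b)

-- ===== LEMMAS AND PROOFS =====
theorem ediv_zero_iff_lt (a p : Int) (ha : 0 ≤ a) (hp : 0 < p) : a / p = 0 ↔ a < p := by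
  constructor
  · intro h
    have h1 := Int.mul_ediv_add_emod a p
    have h2 := Int.emod_lt_of_pos a hp
    rw [h] at h1; omega
  · exact fun h => Int.ediv_eq_zero_of_lt ha h

theorem mul_add_ediv_self (p X r : Int) (hp : 0 < p) (h0 : 0 ≤ r) (h1 : r < p) :
    (p * X + r) / p = X := by
  rw [add_comm, Int.add_mul_ediv_left r X (ne_of_gt hp),
      Int.ediv_eq_zero_of_lt h0 h1, zero_add]

theorem ediv_ediv_ten (a p : Int) (hp : 0 ≤ p) : a / p / 10 = a / (10 * p) := by
  rw [Int.ediv_ediv_of_nonneg hp, mul_comm]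

theorem emod_mul_ten (a p : Int) (hp : 0 < p) :
    a % (10 * p) = p * (a / p % 10) + a % p := by
  have h1 : a / p / 10 = a / (10 * p) := ediv_ediv_ten a p (le_of_lt hp)
  have h2 := Int.mul_ediv_add_emod a p
  have h3 := Int.mul_ediv_add_emod (a / p) 10
  have h4 := Int.emod_def a (10 * p)
  rw [← h1] at h4
  rw [h4]; linear_combination -h2 - p * h3

-- the carry into position p computed positionally equals the propagated carry
theorem carry_step (a b p : Int) (hp : 0 < p) :
    (a % (10 * p) + b % (10 * p)) / (10 * p) =
      (a / p % 10 + b / p % 10 + (a % p + b % p) / p) / 10 := by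
  have hra := Int.emod_nonneg a (ne_of_gt hp)
  have hrb := Int.emod_nonneg b (ne_of_gt hp)
  have hra' := Int.emod_lt_of_pos a hp
  have hrb' := Int.emod_lt_of_pos b hp
  have hc := Int.mul_ediv_add_emod (a % p + b % p) p
  have hr'0 := Int.emod_nonneg (a % p + b % p) (ne_of_gt hp)
  have hr'1 := Int.emod_lt_of_pos (a % p + b % p) hp
  have key : a % (10 * p) + b % (10 * p) =
      p * (a / p % 10 + b / p % 10 + (a % p + b % p) / p) + (a % p + b % p) % p := by
    rw [emod_mul_ten a p hp, emod_mul_ten b p hp]; linear_combination -hc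
  rw [key, mul_comm (10 : Int) p, ← Int.ediv_ediv_of_nonneg (le_of_lt hp),
      mul_add_ediv_self p _ _ hp hr'0 hr'1]

-- the printed sum digit: (a+b)//p % 10 equals (a//p + b//p + carry) % 10
theorem sum_div (a b p : Int) (hp : 0 < p) :
    (a + b) / p = a / p + b / p + (a % p + b % p) / p := by
  have ha := Int.mul_ediv_add_emod a p
  have hb := Int.mul_ediv_add_emod b p
  have hc := Int.mul_ediv_add_emod (a % p + b % p) p
  have hr'0 := Int.emod_nonneg (a % p + b % p) (ne_of_gt hp)
  have hr'1 := Int.emod_lt_of_pos (a % p + b % p) hp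
  have key : a + b = p * (a / p + b / p + (a % p + b % p) / p) + (a % p + b % p) % p := by
    linear_combination -ha - hb - hc
  rw [key, mul_add_ediv_self p _ _ hp hr'0 hr'1]

-- A's loop, started at the state positionally determined by power p, is B's rows pass
theorem genAddLoop_eq_rows (fuel : Nat) :
    ∀ (a b p : Int) (text : String), 0 ≤ a → 0 ≤ b → 0 < p →
      a < p * 10 ^ fuel → b < p * 10 ^ fuel →
      genAddLoop (fuel + 1) (a / p) (b / p) ((a % p + b % p) / p) text =
        text ++ genAddRows (fuel + 1) a b (a + b) p := by
  induction fuel with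
  | zero =>
    intro a b p text ha hb hp ha' hb'
    simp only [pow_zero, mul_one] at ha' hb'
    have hqa : a / p = 0 := (ediv_zero_iff_lt a p ha hp).2 ha'
    have hqb : b / p = 0 := (ediv_zero_iff_lt b p hb hp).2 hb'
    rw [genAddLoop, genAddRows]
    have hcond : ((a / p == 0) && (b / p == 0)) = true := by simp [hqa, hqb]
    have hcond' : (decide (a < p) && decide (b < p)) = true := by simp [ha', hb']
    simp only [hcond, hcond', if_true,
      PySem.Int.floordiv_eq_ediv_of_pos hp, PySem.Int.mod_eq_emod_of_pos hp,
      PySem.Int.mod_eq_emod_of_pos (show (0:Int) < 10 by norm_num)]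
    simp [String.append_assoc]
  | succ n ih =>
    intro a b p text ha hb hp ha' hb'
    rw [genAddLoop, genAddRows]
    simp only [PySem.Int.floordiv_eq_ediv_of_pos hp, PySem.Int.mod_eq_emod_of_pos hp,
      PySem.Int.floordiv_eq_ediv_of_pos (show (0:Int) < 10 by norm_num),
      PySem.Int.mod_eq_emod_of_pos (show (0:Int) < 10 by norm_num)]
    have hiff : ((a / p == 0) && (b / p == 0)) = (decide (a < p) && decide (b < p)) := by
      by_cases h1 : a < p <;> by_cases h2 : b < p <;>
        simp [ediv_zero_iff_lt a p ha hp, ediv_zero_iff_lt b p hb hp, h1, h2]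
    rw [hiff]
    by_cases h : a < p ∧ b < p
    · simp [h.1, h.2, String.append_assoc]
    · have hcond : (decide (a < p) && decide (b < p)) = false := by
        rcases not_and_or.1 h with h' | h' <;> simp [h']
      simp only [hcond, Bool.false_eq_true, if_false]
      have h10p : (0:Int) < 10 * p := by omega
      have hstep : a / p / 10 = a / (10 * p) := ediv_ediv_ten a p (le_of_lt hp)
      have hstep' : b / p / 10 = b / (10 * p) := ediv_ediv_ten b p (le_of_lt hp)
      have hbound : p * 10 ^ (n + 1) = 10 * p * 10 ^ n := by rw [pow_succ]; ring
      rw [sum_div a b p hp, ← carry_step a b p hp, hstep, hstep',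
        ih a b (10 * p) _ ha hb h10p (by omega) (by omega)]
      simp [String.append_assoc]

-- ===== VERDICT =====
theorem generate_addition_spec : Claim_equal_generate_addition := by
  intro a b hdom hpre
  have hd : a ≤ 2147483648 ∧ b ≤ 2147483648 := by
    unfold Dom_generate_addition pvDomInt at hdom
    simp only [Bool.and_eq_true, decide_eq_true_eq] at hdom
    exact ⟨hdom.1.2, hdom.2.2⟩
  unfold Spec_generate_addition
  simp only [generate_addition, generate_addition_alt, show (40:Nat) = 39 + 1 from rfl]
  have h := genAddLoop_eq_rows 39 a b 1 (PySem.Int.toStr a ++ " + " ++ PySem.Int.toStr b ++ " : ")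
      hpre.1 hpre.2 (by norm_num) (by norm_num; omega) (by norm_num; omega)
  simp only [Int.ediv_one, Int.emod_one, add_zero] at h
  rw [h]
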